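-- pv_equiv track=rewrite | github.com/Pauloarf/PL2025-A96268 | TPC5/maquina.py | betterPrint
-- ===== SOURCE A (Python) =====
-- def betterPrint(tipo):
--     tipoSize = len(tipo)
--     while tipoSize < 13:
--         if tipoSize % 2 == 0:
--             tipo += ' '
--         else:
--             tipo = ' ' + tipo
--         tipoSize += 1
--     return tipo
-- ===== SOURCE B (Python) =====
-- def betterPrint(tipo):
--     n = len(tipo)
--     if n >= 13:
--         return tipo
--     right = sum(1 for i in range(n, 13) if i % 2 == 0)
--     left = (13 - n) - right
--     return ' ' * left + tipo + ' ' * right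
-- ===== Notes on version B (the rewrite author's own statement) =====
-- stated objective: simpler
-- what changed: Replaces the one-character-per-iteration padding loop with a closed-form computation of the left and right pad widths (parity count over range(n,13)) and a single concatenation.
import Mathlib
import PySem

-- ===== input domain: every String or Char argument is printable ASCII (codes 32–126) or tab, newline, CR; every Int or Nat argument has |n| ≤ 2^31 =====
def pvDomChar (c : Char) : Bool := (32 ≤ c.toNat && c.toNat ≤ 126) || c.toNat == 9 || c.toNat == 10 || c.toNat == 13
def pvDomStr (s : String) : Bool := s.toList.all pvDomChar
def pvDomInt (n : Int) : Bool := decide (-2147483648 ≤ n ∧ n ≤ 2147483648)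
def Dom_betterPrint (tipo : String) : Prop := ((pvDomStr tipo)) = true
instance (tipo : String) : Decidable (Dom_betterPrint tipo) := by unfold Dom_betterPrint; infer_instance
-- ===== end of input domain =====

-- B derives the two pad widths in closed form (parity count over range(n,13)) instead of the per-character loop; objective: simpler.
-- ===== PORT A =====
-- the while loop: one recursive step per iteration, same state (tipo, tipoSize)
def betterPrintGo (tipo : List Char) (tipoSize : Nat) : List Char :=
  if tipoSize < 13 then
    if tipoSize % 2 == 0 then betterPrintGo (tipo ++ [' ']) (tipoSize + 1)
    else betterPrintGo (' ' :: tipo) (tipoSize + 1)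
  else tipo
termination_by 13 - tipoSize

def betterPrint (tipo : String) : String :=
  String.ofList (betterPrintGo tipo.toList tipo.toList.length)

-- ===== PORT B =====
def betterPrint_alt (tipo : String) : String :=
  let t := tipo.toList
  let n := t.length
  if n ≥ 13 then tipo
  else
    let right := ((PySem.List.pyRange (Int.ofNat n) 13 1).filter (fun i => i % 2 == 0)).length
    let left := (13 - n) - right
    String.ofList (List.replicate left ' ' ++ t ++ List.replicate right ' ')

-- ===== PRECONDITION & SPEC =====
def Spec_betterPrint (tipo : String) (out : String) : Prop := out = betterPrint_alt tipo
instance (tipo : String) (out : String) : Decidable (Spec_betterPrint tipo out) := by unfold Spec_betterPrint; infer_instance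

-- ===== CLAIM (what is proved, stated in full; the proofs are below) =====
def Claim_equal_betterPrint : Prop := ∀ (tipo : String), Dom_betterPrint tipo → Spec_betterPrint tipo (betterPrint tipo)

-- ===== LEMMAS AND PROOFS =====

-- ===== VERDICT (by name: the statement is the Claim_ definition above) =====
-- key lemma: for every starting length n < 13 the loop result is the closed form
theorem go_closed (t : List Char) (h : t.length < 13) :
    betterPrintGo t t.length =
      List.replicate ((13 - t.length) - ((PySem.List.pyRange (Int.ofNat t.length) 13 1).filter (fun i => i % 2 == 0)).length) ' '
        ++ t ++ List.replicate ((PySem.List.pyRange (Int.ofNat t.length) 13 1).filter (fun i => i % 2 == 0)).length ' ' := by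
  interval_cases h : t.length <;>
    simp_all [betterPrintGo, PySem.List.pyRange, List.range_succ]

theorem betterPrint_spec : Claim_equal_betterPrint := by
  intro tipo _
  unfold Spec_betterPrint betterPrint betterPrint_alt
  by_cases h : tipo.toList.length ≥ 13
  · rw [betterPrintGo]
    rw [if_neg (by omega), if_pos (by simpa using h)]
    exact String.ofList_toList
  · have h' : tipo.toList.length < 13 := Nat.lt_of_not_le h
    rw [if_neg h, go_closed _ h']
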